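-- pv_equiv track=rewrite | github.com/gomachssm/twsqlparser | twsqlparser/twsp.py | _delete_last_space
-- ===== SOURCE A (Python) =====
-- def _delete_last_space(q: list) -> list:
--     idx = len(q) - 1
--     while -1 < idx:
--         idx_str = q[idx].rstrip(' ')
--         if idx_str:
--             q[idx] = idx_str
--             break
--         del q[idx]
--         idx -= 1
--     return q
-- ===== SOURCE B (Python) =====
-- def _delete_last_space(q: list) -> list:
--     keep = 0
--     for i, s in enumerate(q):
--         if s.rstrip(' '):
--             keep = i + 1
--     if keep:
--         q[keep - 1] = q[keep - 1].rstrip(' ')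
--     del q[keep:]
--     return q
-- ===== Notes on version B (the rewrite author's own statement) =====
-- stated objective: alternative
-- what changed: B replaces A's backward early-exit delete loop by a single forward pass that records the index after the last element with a nonempty rstrip, then strips that element and truncates once; it trades A's O(trailing-blanks) work for one full forward scan.
import Mathlib
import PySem

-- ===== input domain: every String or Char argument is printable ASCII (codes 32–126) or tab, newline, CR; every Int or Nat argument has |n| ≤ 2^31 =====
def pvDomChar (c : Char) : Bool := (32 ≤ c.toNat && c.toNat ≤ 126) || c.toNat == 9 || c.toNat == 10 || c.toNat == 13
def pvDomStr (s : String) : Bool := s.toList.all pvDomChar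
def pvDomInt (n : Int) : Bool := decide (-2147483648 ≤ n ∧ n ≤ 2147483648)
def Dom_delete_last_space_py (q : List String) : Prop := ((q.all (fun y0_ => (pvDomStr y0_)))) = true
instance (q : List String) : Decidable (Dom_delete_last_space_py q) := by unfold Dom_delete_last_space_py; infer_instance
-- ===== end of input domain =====

-- B does a single forward pass recording the cut point instead of A's backward delete loop (alternative decomposition).
-- (A mutates its argument in place and B performs the same mutation; the equivalence proved here is about the return value.)

-- ===== PORT A =====
-- s.rstrip(' '): strip trailing ' ' characters only (exact: the strip set is the single char ' ')
def pvRstripSpace (s : String) : String :=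
  String.ofList (((s.toList.reverse).dropWhile (· == ' ')).reverse)

-- while loop: idx always points at the current last element (deletions shrink the list in step with idx)
def delete_last_space_py (q : List String) : List String :=
  if h : q = [] then q
  else
    let idx_str := pvRstripSpace (q.getLast h)
    if idx_str ≠ "" then q.dropLast ++ [idx_str]
    else delete_last_space_py q.dropLast
termination_by q.length
decreasing_by have := List.length_pos_of_ne_nil h; simp [List.length_dropLast]; omega

-- ===== PORT B =====
-- the for-loop of Source B: keep = index after the last element whose rstrip(' ') is nonempty
def pvKeep (q : List String) : Nat :=
  q.zipIdx.foldl (fun k si => if pvRstripSpace si.1 ≠ "" then si.2 + 1 else k) 0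

def delete_last_space_py_alt (q : List String) : List String :=
  let keep := pvKeep q
  let q1 := if keep ≠ 0 then q.set (keep - 1) (pvRstripSpace (q.getD (keep - 1) "")) else q
  q1.take keep      -- del q[keep:]

-- ===== PRECONDITION & SPEC =====
def Spec_delete_last_space_py (q : List String) (out : List String) : Prop := out = delete_last_space_py_alt q
instance (q : List String) (out : List String) : Decidable (Spec_delete_last_space_py q out) := by unfold Spec_delete_last_space_py; infer_instance

-- ===== CLAIM (what is proved, stated in full; the proofs are below) =====
def Claim_equal_delete_last_space_py : Prop := ∀ (q : List String), Dom_delete_last_space_py q → Spec_delete_last_space_py q (delete_last_space_py q)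

-- ===== LEMMAS AND PROOFS =====
theorem pvKeep_append (xs : List String) (x : String) :
    pvKeep (xs ++ [x]) = if pvRstripSpace x ≠ "" then xs.length + 1 else pvKeep xs := by
  simp [pvKeep, List.zipIdx_append, List.foldl_append]

theorem pvKeep_le (xs : List String) : pvKeep xs ≤ xs.length := by
  induction xs using List.reverseRecOn with
  | nil => simp [pvKeep]
  | append_singleton xs x ih =>
    rw [pvKeep_append]
    split_ifs
    · simp
    · simpa using Nat.le_succ_of_le ih

theorem pvAlt_append_blank (xs : List String) (x : String) (hx : pvRstripSpace x = "") :
    delete_last_space_py_alt (xs ++ [x]) = delete_last_space_py_alt xs := by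
  unfold delete_last_space_py_alt
  have hk : pvKeep (xs ++ [x]) = pvKeep xs := by simp [pvKeep_append, hx]
  have hle := pvKeep_le xs
  rw [hk]
  by_cases h0 : pvKeep xs = 0
  · simp [h0]
  · have h1 : pvKeep xs - 1 < xs.length := by omega
    simp only [h0, ne_eq, not_false_iff, if_pos]
    rw [List.getD, List.getD, List.getElem?_append_left h1, List.set_append_left _ _ h1,
        List.take_append_of_le_length (by simpa using hle)]

theorem pv_eq (q : List String) : delete_last_space_py q = delete_last_space_py_alt q := by
  induction q using List.reverseRecOn with
  | nil => rw [delete_last_space_py.eq_def]; rfl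
  | append_singleton xs x ih =>
    have hne : xs ++ [x] ≠ [] := by simp
    rw [delete_last_space_py.eq_def]
    simp only [hne, dite_false, List.getLast_append_singleton, List.dropLast_concat]
    by_cases h : pvRstripSpace x = ""
    · simp only [h, ne_eq, not_true_eq_false, if_false]
      rw [ih, pvAlt_append_blank xs x h]
    · simp only [ne_eq, h, not_false_iff, if_true]
      unfold delete_last_space_py_alt
      have hk : pvKeep (xs ++ [x]) = xs.length + 1 := by simp [pvKeep_append, h]
      simp only [hk]
      simp [List.getD,
        List.take_of_length_le (by simp : (xs ++ [pvRstripSpace x]).length ≤ xs.length + 1)]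

-- ===== VERDICT (by name: the statement is the Claim_ definition above) =====
theorem delete_last_space_py_spec : Claim_equal_delete_last_space_py := by
  intro q _
  unfold Spec_delete_last_space_py
  exact pv_eq q
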